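-- pv_equiv track=rewrite | github.com/ClaraRus/TravelPythonAPI | APIProject/mysite/myapi/TextMining/ActivitiesNER.py | filter_enums
-- ===== SOURCE A (Python) =====
-- def filter_enums(enumerations, destination):
--     excluded_enums = []
--     for enum in enumerations:
--         if enum.count(',') < 2 and 'and' not in enum:
--             excluded_enums.append(enum)
--
--         match = [x for x in destination.split(' ') if
--                  x + "," in enum or x + " and" in enum or "and " + x in enum or ", " + x in enum]
--         if len(match) > 0:
--             excluded_enums.append(enum)
--
--     for enum in excluded_enums:
--         if enum in enumerations:
--             enumerations.remove(enum)
--     return enumerations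
-- ===== SOURCE B (Python) =====
-- def filter_enums(enumerations, destination):
--     # One filtering pass: keep an enum iff it triggers neither exclusion rule.
--     # (Returns a new list; A mutates its argument in place.)
--     words = destination.split(' ')
--
--     def keep(enum):
--         if enum.count(',') < 2 and 'and' not in enum:
--             return False
--         return not any(x + "," in enum or x + " and" in enum or
--                        "and " + x in enum or ", " + x in enum for x in words)
--
--     return [enum for enum in enumerations if keep(enum)]
-- ===== Notes on version B (the rewrite author's own statement) =====
-- stated objective: faster
-- what changed: B replaces A's build-an-exclusion-list-then-repeatedly-list.remove scheme (each remove/membership test rescans the list) with a single filtering pass that keeps an enum iff it triggers neither exclusion rule; B returns a new list instead of mutating the argument (return value identical).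
import Mathlib
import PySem

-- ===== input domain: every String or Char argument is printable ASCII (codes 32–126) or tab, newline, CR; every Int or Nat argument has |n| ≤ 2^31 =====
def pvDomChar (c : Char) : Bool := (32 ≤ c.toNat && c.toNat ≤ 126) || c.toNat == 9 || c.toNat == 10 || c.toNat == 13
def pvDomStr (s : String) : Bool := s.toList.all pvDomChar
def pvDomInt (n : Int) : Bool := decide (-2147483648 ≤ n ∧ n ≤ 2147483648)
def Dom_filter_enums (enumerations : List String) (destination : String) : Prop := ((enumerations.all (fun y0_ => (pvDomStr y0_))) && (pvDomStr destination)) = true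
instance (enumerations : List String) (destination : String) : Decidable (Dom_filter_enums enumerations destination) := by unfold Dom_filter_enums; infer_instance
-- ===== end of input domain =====

-- B replaces the exclusion-list + repeated list.remove scheme by one filtering pass with the
-- same return value; A also mutates its argument in place (the claim is about the return value).

-- ===== PORT A =====
-- 'enum.count(',') < 2 and 'and' not in enum'
def pvCond1 (enum : String) : Bool :=
  decide (PySem.Str.count enum "," < 2) && !(PySem.Str.isIn "and" enum)

-- the bracketed condition of the 'match' comprehension, for one word x of destination
def pvWordMatch (x enum : String) : Bool :=
  PySem.Str.isIn (x ++ ",") enum || PySem.Str.isIn (x ++ " and") enum ||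
  PySem.Str.isIn ("and " ++ x) enum || PySem.Str.isIn (", " ++ x) enum

def filter_enums (enumerations : List String) (destination : String) : List String :=
  let excluded_enums : List String :=
    enumerations.foldl (fun acc enum =>
      let acc := if pvCond1 enum then acc ++ [enum] else acc
      let mtch := (match PySem.Str.split? destination " " with
                   | some ws => ws
                   | none => []).filter (fun x => pvWordMatch x enum)
      if 0 < mtch.length then acc ++ [enum] else acc) []
  excluded_enums.foldl (fun acc enum =>
    if acc.contains enum then
      match PySem.List.remove? acc enum with
      | some l => l
      | none => acc
    else acc) enumerations

-- ===== PORT B =====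
def pvKeep (words : List String) (enum : String) : Bool :=
  if pvCond1 enum then false
  else !(words.any (fun x => pvWordMatch x enum))

def filter_enums_alt (enumerations : List String) (destination : String) : List String :=
  let words := match PySem.Str.split? destination " " with
               | some ws => ws
               | none => []
  enumerations.filter (fun enum => pvKeep words enum)

-- ===== PRECONDITION & SPEC =====
def Spec_filter_enums (enumerations : List String) (destination : String) (out : List String) : Prop := out = filter_enums_alt enumerations destination
instance (enumerations : List String) (destination : String) (out : List String) : Decidable (Spec_filter_enums enumerations destination out) := by unfold Spec_filter_enums; infer_instance

-- ===== CLAIM (what is proved, stated in full; the proofs are below) =====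
def Claim_equal_filter_enums : Prop := ∀ (enumerations : List String) (destination : String), Dom_filter_enums enumerations destination → Spec_filter_enums enumerations destination (filter_enums enumerations destination)

-- ===== LEMMAS AND PROOFS =====

-- the whole-enum exclusion predicate ('enum lands in excluded_enums at least once')
def pvBad (words : List String) (enum : String) : Bool :=
  pvCond1 enum || words.any (fun x => pvWordMatch x enum)

-- the copies of enum that A's first loop appends to excluded_enums
def pvCopies (words : List String) (enum : String) : List String :=
  (if pvCond1 enum then [enum] else []) ++
  (if words.any (fun x => pvWordMatch x enum) then [enum] else [])

lemma mem_pvCopies {words : List String} {x enum : String}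
    (h : x ∈ pvCopies words enum) : x = enum ∧ pvBad words enum = true := by
  unfold pvCopies pvBad at *
  split_ifs at h <;> simp_all

lemma count_pvCopies_of_bad {words : List String} {enum : String}
    (h : pvBad words enum = true) : 1 ≤ (pvCopies words enum).count enum := by
  unfold pvCopies pvBad at *
  split_ifs <;> simp_all

-- a guarded Python 'remove' is Lean's erase (which is the identity when absent)
lemma step_eq_erase (acc : List String) (e : String) :
    (if acc.contains e then
      match PySem.List.remove? acc e with
      | some l => l
      | none => acc
    else acc) = acc.erase e := by
  by_cases h : e ∈ acc
  · rw [PySem.List.remove?_eq_some_erase acc e h]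
    simp [h]
  · rw [if_neg (by simpa using h), List.erase_of_not_mem h]

lemma filter_erase_of_neg {p : String → Bool} {a : String} (l : List String)
    (h : p a = false) : (l.erase a).filter p = l.filter p := by
  induction l with
  | nil => simp
  | cons x xs ih =>
    by_cases hx : x = a
    · subst hx; simp [h]
    · have hxa : (x == a) = false := by simpa using hx
      simp [hxa, List.filter_cons, ih]

-- core: diffing away a list M of bad elements that covers the multiplicity of every
-- bad element of L leaves exactly the good elements of L, in order
lemma diff_eq_filter (bad : String → Bool) :
    ∀ (M L : List String), (∀ x ∈ M, bad x = true) →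
    (∀ v, bad v = true → L.count v ≤ M.count v) →
    L.diff M = L.filter (fun e => !bad e) := by
  intro M
  induction M with
  | nil =>
    intro L _ hcnt
    rw [List.diff_nil, Eq.comm, List.filter_eq_self]
    intro a ha
    by_contra hb
    have hbad : bad a = true := by simpa using hb
    have h0 := hcnt a hbad
    simp at h0
    exact (List.count_pos_iff.mpr ha).ne' (by omega)
  | cons m M' ih =>
    intro L hbad hcnt
    have hm : bad m = true := hbad m List.mem_cons_self
    rw [List.diff_cons,
        ih (L.erase m) (fun x hx => hbad x (List.mem_cons_of_mem _ hx)) ?_,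
        filter_erase_of_neg L (by simp [hm])]
    intro v hv
    have h1 := hcnt v hv
    by_cases hvm : v = m
    · subst hvm
      have hc : (v :: M').count v = M'.count v + 1 := by simp
      have h2 : (L.erase v).count v = L.count v - 1 := List.count_erase_self
      omega
    · have hc : (m :: M').count v = M'.count v := by
        have : (m == v) = false := by simpa using fun h => hvm h.symm
        simp [List.count_cons, this]
      have h2 : (L.erase m).count v = L.count v := List.count_erase_of_ne hvm
      omega

lemma count_flatMap_copies (words : List String) (v : String)
    (L : List String) (hv : pvBad words v = true) :
    L.count v ≤ (L.flatMap (pvCopies words)).count v := by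
  induction L with
  | nil => simp
  | cons x xs ih =>
    simp only [List.flatMap_cons, List.count_append, List.count_cons]
    by_cases hx : x = v
    · subst hx
      have h2 := count_pvCopies_of_bad (words := words) hv
      simp only [BEq.rfl, if_true]
      omega
    · have hxv : (x == v) = false := by simpa using hx
      simp [hxv]
      omega

-- one iteration of A's first loop appends pvCopies
lemma pvStep_eq (words : List String) (acc : List String) (enum : String) :
    (let acc' := if pvCond1 enum then acc ++ [enum] else acc
     let mtch := words.filter (fun x => pvWordMatch x enum)
     if 0 < mtch.length then acc' ++ [enum] else acc') =
    acc ++ pvCopies words enum := by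
  have hlen : (0 < (words.filter (fun x => pvWordMatch x enum)).length) ↔
      words.any (fun x => pvWordMatch x enum) = true := by
    simp [List.length_pos_iff_exists_mem, List.mem_filter, List.any_eq_true]
  unfold pvCopies
  by_cases h1 : pvCond1 enum = true <;>
    by_cases h2 : words.any (fun x => pvWordMatch x enum) = true <;>
      simp [h1, h2, hlen]

-- A's excluded_enums list is the flatMap of the per-enum copies
lemma excluded_eq_flatMap (words : List String) :
    ∀ (L acc : List String),
    L.foldl (fun acc enum =>
      let acc := if pvCond1 enum then acc ++ [enum] else acc
      let mtch := words.filter (fun x => pvWordMatch x enum)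
      if 0 < mtch.length then acc ++ [enum] else acc) acc =
    acc ++ L.flatMap (pvCopies words) := by
  intro L acc
  simp only [pvStep_eq]
  exact PySem.List.foldl_append_eq_flatMap _ L acc

-- ===== VERDICT (by name: the statement is the Claim_ definition above) =====
theorem filter_enums_spec : Claim_equal_filter_enums := by
  intro L destination _
  unfold Spec_filter_enums filter_enums filter_enums_alt
  set words := (match PySem.Str.split? destination " " with
                | some ws => ws
                | none => []) with hw
  simp only
  rw [excluded_eq_flatMap words L []]
  have hfold : ∀ (M L₀ : List String),
      M.foldl (fun acc enum =>
        if acc.contains enum then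
          match PySem.List.remove? acc enum with
          | some l => l
          | none => acc
        else acc) L₀ = L₀.diff M := by
    intro M
    induction M with
    | nil => intro L₀; simp
    | cons m M' ih =>
      intro L₀
      rw [List.foldl_cons, step_eq_erase, ih, List.diff_cons]
  rw [List.nil_append, hfold]
  rw [diff_eq_filter (pvBad words) (L.flatMap (pvCopies words)) L
    (fun x hx => by
      obtain ⟨e, _, hxe⟩ := List.mem_flatMap.mp hx
      obtain ⟨heq, hb⟩ := mem_pvCopies hxe
      rw [heq]; exact hb)
    (fun v hv => count_flatMap_copies words v L hv)]
  apply List.filter_congr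
  intro e _
  unfold pvKeep pvBad
  by_cases h1 : pvCond1 e = true <;> simp [h1]
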